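-- pv_equiv track=rewrite | github.com/ehddn5252/Algorithm | personalWorkspace/test/202210_dev_metching/prob3_1.py | solution
-- ===== SOURCE A (Python) =====
-- from itertools import product
--
-- def solution(k):
--
--     d:dict = {0:6, 1:2, 2:5, 3:5, 4:4,5:5,6:6,7:3,8:7,9:6}
--     sets_num = [6,2,5,5,4,5,6,3,7,6]
--     sets = [0,1,2,3,4,5,6,7,8,9]
--     # 순열 사용해서 다 돌려보기
--     count=0
--     for i in product(sets, repeat = 1):
--         sum_value=0
--         if i[0]==0:
--             continue
--         for j in range(len(i)):
--             sum_value+=d[i[j]]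
--         if sum_value==k:
--             count+=1
--
--     for i in product(sets, repeat = 2):
--         sum_value=0
--         if 10>int(str(i[0])+str(i[1])):
--             continue
--         for j in range(len(i)):
--             sum_value+=d[i[j]]
--         if sum_value==k:
--             count+=1
--
--     for i in product(sets, repeat = 3):
--         sum_value=0
--         if 100>int(str(i[0])+str(i[1])+str(i[2])):
--             continue
--         for j in range(len(i)):
--             sum_value+=d[i[j]]
--         if sum_value==k:
--             count+=1
--
--     for i in product(sets, repeat = 4):
--         sum_value=0
--         if 1000>int(str(i[0])+str(i[1])+str(i[2])+str(i[3])):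
--             continue
--         for j in range(len(i)):
--             sum_value+=d[i[j]]
--         if sum_value==k:
--             count+=1
--     for i in product(sets, repeat = 5):
--         sum_value=0
--         if 10000>int(str(i[0])+str(i[1])+str(i[2])+str(i[3])+str(i[4])):
--             continue
--         for j in range(len(i)):
--             sum_value+=d[i[j]]
--         if sum_value==k:
--             count+=1
--
--     for i in product(sets, repeat = 6):
--         sum_value=0
--         if 100000>int(str(i[0])+str(i[1])+str(i[2])+str(i[3])+str(i[4])+str(i[5])):
--             continue
--         for j in range(len(i)):
--             sum_value+=d[i[j]]
--         if sum_value==k: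
--             count+=1
--
--
--     return count
-- ===== SOURCE B (Python) =====
-- # DP over digit-length: a dict maps segment-sum -> how many numbers of that length have it;
-- # each extra digit is a convolution with the per-digit segment counts. O(6*43*10) vs A's 10^6 enumeration.
-- SEG = [6, 2, 5, 5, 4, 5, 6, 3, 7, 6]
--
--
-- def _conv(cur):
--     nxt = {}
--     for s, c in cur.items():
--         for dg in range(10):
--             t = s + SEG[dg]
--             nxt[t] = nxt.get(t, 0) + c
--     return nxt
--
--
-- def solution(k):
--     cur = {}
--     for dg in range(1, 10):          # first digit: no leading zero
--         cur[SEG[dg]] = cur.get(SEG[dg], 0) + 1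
--     total = cur.get(k, 0)
--     for _ in range(5):               # lengths 2..6
--         cur = _conv(cur)
--         total += cur.get(k, 0)
--     return total
-- ===== Notes on version B (the rewrite author's own statement) =====
-- stated objective: faster
-- what changed: A enumerates every digit tuple of length one to six (about a million tuples, rebuilding each number as a string to test the leading-zero guard) and tests each tuple's segment-count sum against k; B runs a dict-based dynamic program over digit length, convolving a segment-sum histogram with the per-digit segment counts once per extra digit and summing the histogram entries at k.
import Mathlib
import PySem

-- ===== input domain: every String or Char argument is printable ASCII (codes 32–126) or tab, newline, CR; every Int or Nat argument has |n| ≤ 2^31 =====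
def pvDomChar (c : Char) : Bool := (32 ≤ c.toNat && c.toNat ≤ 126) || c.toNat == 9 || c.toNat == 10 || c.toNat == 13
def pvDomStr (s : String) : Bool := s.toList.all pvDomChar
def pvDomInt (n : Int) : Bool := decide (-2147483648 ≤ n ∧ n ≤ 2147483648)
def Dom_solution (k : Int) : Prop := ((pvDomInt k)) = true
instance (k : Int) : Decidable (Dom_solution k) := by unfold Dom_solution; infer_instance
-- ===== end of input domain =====

-- B replaces A's brute-force enumeration of every one- to six-digit tuple by a dict DP over digit
-- length (segment-sum histogram convolved once per extra digit); measured much faster (constant factor).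
-- In port A, Python's `int(str(i[0])+…+str(i[j]))` (decimal concatenation of single-digit strings drawn
-- from `sets = [0..9]`) is ported by hand as positional arithmetic (e.g. 10*i0+i1), which is exact for
-- every value this code feeds it (digits 0..9); everything else goes through PySem.


-- ===== PORT A =====
-- sets = [0,1,2,3,4,5,6,7,8,9]
def pvSets : List Int := [0, 1, 2, 3, 4, 5, 6, 7, 8, 9]
-- d = {0:6, 1:2, 2:5, 3:5, 4:4, 5:5, 6:6, 7:3, 8:7, 9:6}
def pvDictD : PySem.Dict Int Int :=
  PySem.Dict.ofList [(0,6),(1,2),(2,5),(3,5),(4,4),(5,5),(6,6),(7,3),(8,7),(9,6)]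
-- itertools.product(xs, repeat = r), lexicographic (first component varies slowest)
def pyProduct (xs : List Int) : Nat → List (List Int)
  | 0 => [[]]
  | n + 1 => xs.flatMap (fun x => (pyProduct xs n).map (fun t => x :: t))
-- `sum_value = 0; for j in range(len(i)): sum_value += d[i[j]]`
-- range(len(i)) = [0, …, len(i)-1] = List.range i.length (the length is a Nat, so this is exact);
-- i[j] for the in-range indices 0 ≤ j < len(i) formed here is i.getD j 0 (the default never fires);
-- d[i[j]] is the first-match lookup among d's items — the value PySem.Dict.get? computes — written
-- with List.lookup (KeyError unreachable: d's keys 0..9 cover pvSets)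
def pvSumValue (i : List Int) : Int :=
  (List.range i.length).foldl
    (fun s j => s + (List.lookup (i.getD j 0) pvDictD.items).getD 0) 0
-- int(str(i[0])+str(i[1])) … : decimal concatenation of single-digit strings, ported positionally;
-- exact for the digits 0..9 that pvSets supplies to it
def pvCat2 (i : List Int) : Int := 10 * i.getD 0 0 + i.getD 1 0
def pvCat3 (i : List Int) : Int := 100 * i.getD 0 0 + 10 * i.getD 1 0 + i.getD 2 0
def pvCat4 (i : List Int) : Int :=
  1000 * i.getD 0 0 + 100 * i.getD 1 0 + 10 * i.getD 2 0 + i.getD 3 0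
def pvCat5 (i : List Int) : Int :=
  10000 * i.getD 0 0 + 1000 * i.getD 1 0 + 100 * i.getD 2 0 + 10 * i.getD 3 0 + i.getD 4 0
def pvCat6 (i : List Int) : Int :=
  100000 * i.getD 0 0 + 10000 * i.getD 1 0 + 1000 * i.getD 2 0 + 100 * i.getD 3 0
    + 10 * i.getD 4 0 + i.getD 5 0
-- the six `for i in product(sets, repeat=r):` loops, each threading `count`
def pvLoop1 (k c : Int) : Int :=
  (pyProduct pvSets 1).foldl
    (fun c i => if i.getD 0 0 = 0 then c else if pvSumValue i = k then c + 1 else c) c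
def pvLoop2 (k c : Int) : Int :=
  (pyProduct pvSets 2).foldl
    (fun c i => if 10 > pvCat2 i then c else if pvSumValue i = k then c + 1 else c) c
def pvLoop3 (k c : Int) : Int :=
  (pyProduct pvSets 3).foldl
    (fun c i => if 100 > pvCat3 i then c else if pvSumValue i = k then c + 1 else c) c
def pvLoop4 (k c : Int) : Int :=
  (pyProduct pvSets 4).foldl
    (fun c i => if 1000 > pvCat4 i then c else if pvSumValue i = k then c + 1 else c) c
def pvLoop5 (k c : Int) : Int :=
  (pyProduct pvSets 5).foldl
    (fun c i => if 10000 > pvCat5 i then c else if pvSumValue i = k then c + 1 else c) c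
def pvLoop6 (k c : Int) : Int :=
  (pyProduct pvSets 6).foldl
    (fun c i => if 100000 > pvCat6 i then c else if pvSumValue i = k then c + 1 else c) c

def solution (k : Int) : Int :=
  pvLoop6 k (pvLoop5 k (pvLoop4 k (pvLoop3 k (pvLoop2 k (pvLoop1 k 0)))))

-- ===== PORT B =====
-- SEG = [6,2,5,5,4,5,6,3,7,6]
def pvSeg : List Int := [6, 2, 5, 5, 4, 5, 6, 3, 7, 6]
-- SEG[x] (list index; every use has 0 ≤ x ≤ 9, the default never fires)
def pvSegAt (x : Int) : Int := PySem.List.pyGetD pvSeg x 0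
-- _conv(cur): nxt = {}; for s, c in cur.items(): for dg in range(10): nxt[s+SEG[dg]] += c
def pvConv (cur : PySem.Dict Int Int) : PySem.Dict Int Int :=
  cur.items.foldl
    (fun n p =>
      (PySem.List.pyRange 0 10).foldl
        (fun n dg => n.insert (p.1 + pvSegAt dg) (n.getD (p.1 + pvSegAt dg) 0 + p.2)) n)
    PySem.Dict.empty
-- cur = {}; for dg in range(1, 10): cur[SEG[dg]] = cur.get(SEG[dg], 0) + 1
def pvInit : PySem.Dict Int Int :=
  (PySem.List.pyRange 1 10).foldl
    (fun c dg => c.insert (pvSegAt dg) (c.getD (pvSegAt dg) 0 + 1)) PySem.Dict.empty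

def solution_alt (k : Int) : Int :=
  ((PySem.List.pyRange 0 5).foldl
      (fun (st : PySem.Dict Int Int × Int) _ =>
        (pvConv st.1, st.2 + (pvConv st.1).getD k 0))
      (pvInit, pvInit.getD k 0)).2

-- ===== PRECONDITION & SPEC =====
def Spec_solution (k : Int) (out : Int) : Prop := out = solution_alt k
instance (k : Int) (out : Int) : Decidable (Spec_solution k out) := by unfold Spec_solution; infer_instance

-- ===== CLAIM (what is proved, stated in full; the proofs are below) =====
def Claim_equal_solution : Prop := ∀ (k : Int), Dom_solution k → Spec_solution k (solution k)

-- ===== LEMMAS AND PROOFS =====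

-- digits 1..9 (first digit of a number, no leading zero)
def pvD9 : List Int := [1, 2, 3, 4, 5, 6, 7, 8, 9]

-- number of r-digit tuples over 0..9 whose segment counts sum to s
def cnt : Nat → Int → Int
  | 0, s => if s = 0 then 1 else 0
  | r + 1, s => (pvSets.map (fun x => cnt r (s - pvSegAt x))).sum

-- number of (r+1)-digit tuples with nonzero first digit whose segment counts sum to s
def cntF (r : Nat) (s : Int) : Int := (pvD9.map (fun x => cnt r (s - pvSegAt x))).sum

-- swap a double list sum
lemma sum_map_swap {α β : Type} (l1 : List α) (l2 : List β) (f : α → β → Int) :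
    (l1.map (fun a => (l2.map (f a)).sum)).sum
      = (l2.map (fun b => (l1.map (fun a => f a b)).sum)).sum := by
  induction l1 with
  | nil => simp
  | cons a l1 ih =>
      simp only [List.map_cons, List.sum_cons, ih, PySem.List.sum_map_add_int]

-- the loop shape `if g i: continue; …; if q i == k: count += 1` as a sum of indicators
lemma foldl_guard_count {α : Type} (L : List α) (g q : α → Prop)
    [DecidablePred g] [DecidablePred q] (c : Int) :
    L.foldl (fun c i => if g i then c else if q i then c + 1 else c) c
      = c + (L.map (fun i => if ¬ g i ∧ q i then (1 : Int) else 0)).sum := by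
  induction L generalizing c with
  | nil => simp
  | cons a L ih =>
      simp only [List.foldl_cons, List.map_cons, List.sum_cons, ih]
      split_ifs <;> simp_all
      ring

-- summing over itertools.product = outer sum over the first component
lemma sum_map_flatMap_cons (ds : List Int) (Ps : List (List Int)) (g : List Int → Int) :
    ((ds.flatMap (fun x => Ps.map (fun t => x :: t))).map g).sum
      = (ds.map (fun x => (Ps.map (fun t => g (x :: t))).sum)).sum := by
  induction ds with
  | nil => simp
  | cons a ds ih => simp [List.flatMap_cons, ih, List.map_map, Function.comp_def]

lemma mem_pyProduct {r : Nat} {t : List Int} (h : t ∈ pyProduct pvSets r) :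
    ∀ y ∈ t, y ∈ pvSets := by
  induction r generalizing t with
  | zero => simp [pyProduct] at h; simp [h]
  | succ r ih =>
      simp only [pyProduct, List.mem_flatMap, List.mem_map] at h
      obtain ⟨x, hx, t', ht', rfl⟩ := h
      intro y hy
      rcases List.mem_cons.mp hy with rfl | hy
      · exact hx
      · exact ih ht' y hy

lemma getD_bounds {t : List Int} (h : ∀ y ∈ t, y ∈ pvSets) (j : Nat) :
    0 ≤ t.getD j 0 ∧ t.getD j 0 ≤ 9 := by
  have hb : ∀ y ∈ t, 0 ≤ y ∧ y ≤ 9 := by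
    intro y hy
    have := h y hy
    fin_cases this <;> norm_num
  rw [List.getD_eq_getElem?_getD]
  cases hg : t[j]? with
  | none => simp
  | some a => simpa using hb a (List.mem_of_getElem? hg)

-- the tail-shift of the positional concatenations, definitional
lemma cat2_cons (x : Int) (t : List Int) :
    pvCat2 (x :: t) = 10 * x + t.getD 0 0 := rfl
lemma cat3_cons (x : Int) (t : List Int) :
    pvCat3 (x :: t) = 100 * x + 10 * t.getD 0 0 + t.getD 1 0 := rfl
lemma cat4_cons (x : Int) (t : List Int) :
    pvCat4 (x :: t) = 1000 * x + 100 * t.getD 0 0 + 10 * t.getD 1 0 + t.getD 2 0 := rfl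
lemma cat5_cons (x : Int) (t : List Int) :
    pvCat5 (x :: t)
      = 10000 * x + 1000 * t.getD 0 0 + 100 * t.getD 1 0 + 10 * t.getD 2 0 + t.getD 3 0 := rfl
lemma cat6_cons (x : Int) (t : List Int) :
    pvCat6 (x :: t)
      = 100000 * x + 10000 * t.getD 0 0 + 1000 * t.getD 1 0 + 100 * t.getD 2 0
          + 10 * t.getD 3 0 + t.getD 4 0 := rfl

-- the Python dict d agrees with the SEG table on the digits
lemma dictD_eq_segAt : ∀ y ∈ pvSets, (List.lookup y pvDictD.items).getD 0 = pvSegAt y := by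
  decide

-- reading a list back off by its indices
lemma map_getD_range {α : Type} (l : List α) (d : α) :
    (List.range l.length).map (fun j => l.getD j d) = l := by
  induction l with
  | nil => simp
  | cons x t ih =>
      rw [List.length_cons, List.range_succ_eq_map, List.map_cons, List.map_map]
      simpa using ih

lemma sumValue_eq {t : List Int} (h : ∀ y ∈ t, y ∈ pvSets) :
    pvSumValue t = (t.map pvSegAt).sum := by
  unfold pvSumValue
  rw [PySem.List.foldl_add]
  have h1 : (List.range t.length).map
      (fun j => (List.lookup (t.getD j 0) pvDictD.items).getD 0)
      = ((List.range t.length).map (fun j => t.getD j 0)).map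
          (fun y => (List.lookup y pvDictD.items).getD 0) := by
    rw [List.map_map]; rfl
  rw [h1, map_getD_range, List.map_congr_left (fun y hy => dictD_eq_segAt y (h y hy))]
  omega

-- counting tuples by segment sum gives cnt
lemma sum_indicator_pyProduct : ∀ (r : Nat) (k : Int),
    ((pyProduct pvSets r).map (fun t => if (t.map pvSegAt).sum = k then (1 : Int) else 0)).sum
      = cnt r k := by
  intro r
  induction r with
  | zero =>
      intro k
      simp only [pyProduct, List.map_cons, List.map_nil, List.sum_cons, List.sum_nil, cnt]
      by_cases h : k = 0
      · simp [h]
      · simp [h]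
        omega
  | succ r ih =>
      intro k
      show ((pvSets.flatMap (fun x => (pyProduct pvSets r).map (fun t => x :: t))).map _).sum = _
      rw [sum_map_flatMap_cons]
      simp only [cnt]
      apply congrArg
      apply List.map_congr_left
      intro x _
      rw [← ih (k - pvSegAt x)]
      apply congrArg
      apply List.map_congr_left
      intro t _
      simp only [List.map_cons, List.sum_cons]
      split_ifs <;> omega

-- master lemma: each of A's loops adds cntF r k to the running count,
-- provided the guard holds exactly on tuples with leading digit 0
lemma loopCount (r : Nat) (g : List Int → Prop) [DecidablePred g] (k c : Int)
    (h0 : ∀ t, (∀ y ∈ t, y ∈ pvSets) → g (0 :: t))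
    (h9 : ∀ x, x ∈ pvD9 → ∀ t, (∀ y ∈ t, y ∈ pvSets) → ¬ g (x :: t)) :
    (pyProduct pvSets (r + 1)).foldl
        (fun c i => if g i then c else if pvSumValue i = k then c + 1 else c) c
      = c + cntF r k := by
  rw [foldl_guard_count]
  apply congrArg
  show ((pvSets.flatMap (fun x => (pyProduct pvSets r).map (fun t => x :: t))).map _).sum = _
  rw [sum_map_flatMap_cons]
  have hsplit : ∀ (F : Int → Int), (pvSets.map F).sum = F 0 + (pvD9.map F).sum := by
    intro F; simp [pvSets, pvD9]
  rw [hsplit]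
  have hz : ((pyProduct pvSets r).map
      (fun t => if ¬ g (0 :: t) ∧ pvSumValue (0 :: t) = k then (1 : Int) else 0)).sum = 0 := by
    apply List.sum_eq_zero
    intro v hv
    simp only [List.mem_map] at hv
    obtain ⟨t, ht, rfl⟩ := hv
    have := h0 t (mem_pyProduct ht)
    simp [this]
  rw [hz, zero_add]
  unfold cntF
  apply congrArg
  apply List.map_congr_left
  intro x hx
  have hcong : ∀ t ∈ pyProduct pvSets r,
      (if ¬ g (x :: t) ∧ pvSumValue (x :: t) = k then (1 : Int) else 0)
        = (if (t.map pvSegAt).sum = k - pvSegAt x then (1 : Int) else 0) := by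
    intro t ht
    have hmem := mem_pyProduct ht
    have hng := h9 x hx t hmem
    have hmem' : ∀ y ∈ (x :: t), y ∈ pvSets := by
      intro y hy
      rcases List.mem_cons.mp hy with rfl | hy
      · fin_cases hx <;> decide
      · exact hmem y hy
    rw [sumValue_eq hmem']
    simp only [List.map_cons, List.sum_cons]
    by_cases h : (t.map pvSegAt).sum = k - pvSegAt x
    · rw [if_pos h, if_pos (by constructor; exact hng; omega)]
    · rw [if_neg h, if_neg (by rintro ⟨-, h2⟩; omega)]
  rw [List.map_congr_left hcong, sum_indicator_pyProduct]

-- ---- the six loops ----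
lemma loop1_eq (k c : Int) : pvLoop1 k c = c + cntF 0 k := by
  apply loopCount 0 (fun i => i.getD 0 0 = 0)
  · intro t _; rfl
  · intro x hx t _
    show ¬ ((x :: t).getD 0 0 = 0)
    simp only [List.getD_cons_zero]
    fin_cases hx <;> norm_num

lemma loop2_eq (k c : Int) : pvLoop2 k c = c + cntF 1 k := by
  apply loopCount 1 (fun i => 10 > pvCat2 i)
  · intro t ht
    have b0 := getD_bounds ht 0
    rw [cat2_cons]
    omega
  · intro x hx t ht
    have b0 := getD_bounds ht 0
    have hx1 : 1 ≤ x := by fin_cases hx <;> norm_num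
    rw [cat2_cons]
    omega

lemma loop3_eq (k c : Int) : pvLoop3 k c = c + cntF 2 k := by
  apply loopCount 2 (fun i => 100 > pvCat3 i)
  · intro t ht
    have b0 := getD_bounds ht 0
    have b1 := getD_bounds ht 1
    rw [cat3_cons]
    omega
  · intro x hx t ht
    have b0 := getD_bounds ht 0
    have b1 := getD_bounds ht 1
    have hx1 : 1 ≤ x := by fin_cases hx <;> norm_num
    rw [cat3_cons]
    omega

lemma loop4_eq (k c : Int) : pvLoop4 k c = c + cntF 3 k := by
  apply loopCount 3 (fun i => 1000 > pvCat4 i)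
  · intro t ht
    have b0 := getD_bounds ht 0
    have b1 := getD_bounds ht 1
    have b2 := getD_bounds ht 2
    rw [cat4_cons]
    omega
  · intro x hx t ht
    have b0 := getD_bounds ht 0
    have b1 := getD_bounds ht 1
    have b2 := getD_bounds ht 2
    have hx1 : 1 ≤ x := by fin_cases hx <;> norm_num
    rw [cat4_cons]
    omega

lemma loop5_eq (k c : Int) : pvLoop5 k c = c + cntF 4 k := by
  apply loopCount 4 (fun i => 10000 > pvCat5 i)
  · intro t ht
    have b0 := getD_bounds ht 0
    have b1 := getD_bounds ht 1
    have b2 := getD_bounds ht 2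
    have b3 := getD_bounds ht 3
    rw [cat5_cons]
    omega
  · intro x hx t ht
    have b0 := getD_bounds ht 0
    have b1 := getD_bounds ht 1
    have b2 := getD_bounds ht 2
    have b3 := getD_bounds ht 3
    have hx1 : 1 ≤ x := by fin_cases hx <;> norm_num
    rw [cat5_cons]
    omega

lemma loop6_eq (k c : Int) : pvLoop6 k c = c + cntF 5 k := by
  apply loopCount 5 (fun i => 100000 > pvCat6 i)
  · intro t ht
    have b0 := getD_bounds ht 0
    have b1 := getD_bounds ht 1
    have b2 := getD_bounds ht 2
    have b3 := getD_bounds ht 3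
    have b4 := getD_bounds ht 4
    rw [cat6_cons]
    omega
  · intro x hx t ht
    have b0 := getD_bounds ht 0
    have b1 := getD_bounds ht 1
    have b2 := getD_bounds ht 2
    have b3 := getD_bounds ht 3
    have b4 := getD_bounds ht 4
    have hx1 : 1 ≤ x := by fin_cases hx <;> norm_num
    rw [cat6_cons]
    omega

lemma solution_eq_cntF (k : Int) :
    solution k = cntF 0 k + cntF 1 k + cntF 2 k + cntF 3 k + cntF 4 k + cntF 5 k := by
  unfold solution
  rw [loop1_eq, loop2_eq, loop3_eq, loop4_eq, loop5_eq, loop6_eq]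
  ring

-- ---- B side ----

-- getD after a loop of `d[f x] = d.get(f x, 0) + c x` adds the matching increments
lemma getD_foldl_insert_add (l : List Int) (f cf : Int → Int) (n : PySem.Dict Int Int) (t : Int) :
    (l.foldl (fun n x => n.insert (f x) (n.getD (f x) 0 + cf x)) n).getD t 0
      = n.getD t 0 + (l.map (fun x => if t = f x then cf x else 0)).sum := by
  induction l generalizing n with
  | nil => simp
  | cons a l ih =>
      simp only [List.foldl_cons, List.map_cons, List.sum_cons, ih]
      rw [PySem.Dict.getD_insert]
      split_ifs with h
      · subst h; omega
      · omega

-- getD of a dict with Nodup keys as a sum over its items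
lemma sum_items_getD (l : List (Int × Int)) (hnd : (l.map Prod.fst).Nodup) (a : Int) :
    (l.map (fun p => if a = p.1 then p.2 else 0)).sum = (PySem.Dict.mk l).getD a 0 := by
  induction l with
  | nil => simp [PySem.Dict.getD_eq_get?_getD, PySem.Dict.get?]
  | cons q l ih =>
      obtain ⟨kq, vq⟩ := q
      simp only [List.map_cons, List.nodup_cons] at hnd
      simp only [List.map_cons, List.sum_cons,
        PySem.Dict.getD_eq_get?_getD, PySem.Dict.get?_mk_cons]
      by_cases h : kq = a
      · subst h
        rw [if_pos rfl, if_pos (by simp), Option.getD_some]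
        have hz : (l.map (fun p => if kq = p.1 then p.2 else (0:Int))).sum = 0 := by
          apply List.sum_eq_zero
          intro v hv
          simp only [List.mem_map] at hv
          obtain ⟨p, hp, rfl⟩ := hv
          have : kq ≠ p.1 := fun he => hnd.1 (he ▸ List.mem_map_of_mem hp)
          simp [this]
        simp only [hz]
        omega
      · rw [if_neg (fun he => h he.symm), if_neg (by simp [h]), zero_add,
          ih hnd.2, PySem.Dict.getD_eq_get?_getD]

lemma nodup_keys_pvInit : pvInit.keys.Nodup := by decide

lemma nodup_keys_foldl_conv (l : List (Int × Int)) : ∀ (n : PySem.Dict Int Int), n.keys.Nodup →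
    (l.foldl (fun n p =>
        (PySem.List.pyRange 0 10).foldl
          (fun n dg => n.insert (p.1 + pvSegAt dg) (n.getD (p.1 + pvSegAt dg) 0 + p.2)) n)
      n).keys.Nodup := by
  induction l with
  | nil => intro n hn; simpa using hn
  | cons p l ih =>
      intro n hn
      simp only [List.foldl_cons]
      exact ih _ (PySem.Dict.nodup_keys_foldl_insert_key _ (fun dg => p.1 + pvSegAt dg) _ n hn)

lemma nodup_keys_pvConv (cur : PySem.Dict Int Int) : (pvConv cur).keys.Nodup := by
  unfold pvConv
  exact nodup_keys_foldl_conv cur.items PySem.Dict.empty PySem.Dict.nodup_keys_empty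

lemma pyRange_ten : PySem.List.pyRange 0 10 = pvSets := by decide

-- one convolution step, pointwise
lemma getD_pvConv (cur : PySem.Dict Int Int) (hnd : cur.keys.Nodup) (t : Int) :
    (pvConv cur).getD t 0 = (pvSets.map (fun dg => cur.getD (t - pvSegAt dg) 0)).sum := by
  unfold pvConv
  have houter : ∀ (l : List (Int × Int)) (n : PySem.Dict Int Int),
      (l.foldl (fun n p =>
          (PySem.List.pyRange 0 10).foldl
            (fun n dg => n.insert (p.1 + pvSegAt dg) (n.getD (p.1 + pvSegAt dg) 0 + p.2)) n)
        n).getD t 0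
        = n.getD t 0
          + (l.map (fun p => (pvSets.map (fun dg => if t = p.1 + pvSegAt dg then p.2 else 0)).sum)).sum := by
    intro l
    induction l with
    | nil => simp
    | cons p l ih =>
        intro n
        simp only [List.foldl_cons, List.map_cons, List.sum_cons, ih]
        rw [pyRange_ten, getD_foldl_insert_add]
        omega
  rw [houter, PySem.Dict.getD_empty, zero_add,
    sum_map_swap cur.items pvSets (fun p dg => if t = p.1 + pvSegAt dg then p.2 else 0)]
  apply congrArg
  apply List.map_congr_left
  intro dg _
  have hcond : ∀ p ∈ cur.items,
      (if t = p.1 + pvSegAt dg then p.2 else (0 : Int))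
        = (if t - pvSegAt dg = p.1 then p.2 else 0) := by
    intro p _
    split_ifs <;> omega
  rw [List.map_congr_left hcond,
    sum_items_getD cur.items (by simpa [PySem.Dict.keys] using hnd)]

lemma getD_pvInit (s : Int) : pvInit.getD s 0 = cntF 0 s := by
  unfold pvInit
  have h : PySem.List.pyRange 1 10 = pvD9 := by decide
  rw [h, getD_foldl_insert_add, PySem.Dict.getD_empty, zero_add]
  unfold cntF
  apply congrArg
  apply List.map_congr_left
  intro x _
  simp only [cnt]
  by_cases hc : s = pvSegAt x
  · rw [if_pos hc, if_pos (by omega)]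
  · rw [if_neg hc, if_neg (by omega)]

lemma nodup_iter (n : Nat) : (pvConv^[n] pvInit).keys.Nodup := by
  cases n with
  | zero => exact nodup_keys_pvInit
  | succ n => rw [Function.iterate_succ_apply']; exact nodup_keys_pvConv _

lemma getD_iter : ∀ (n : Nat) (s : Int), (pvConv^[n] pvInit).getD s 0 = cntF n s := by
  intro n
  induction n with
  | zero => intro s; simp only [Function.iterate_zero_apply]; exact getD_pvInit s
  | succ n ih =>
      intro t
      rw [Function.iterate_succ_apply', getD_pvConv _ (nodup_iter n) t]
      have h1 : ∀ dg ∈ pvSets, (pvConv^[n] pvInit).getD (t - pvSegAt dg) 0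
          = cntF n (t - pvSegAt dg) := fun dg _ => ih (t - pvSegAt dg)
      rw [List.map_congr_left h1]
      show (pvSets.map (fun dg => (pvD9.map (fun x => cnt n (t - pvSegAt dg - pvSegAt x))).sum)).sum = _
      rw [sum_map_swap pvSets pvD9 (fun dg x => cnt n (t - pvSegAt dg - pvSegAt x))]
      unfold cntF
      apply congrArg
      apply List.map_congr_left
      intro x _
      simp only [cnt]
      apply congrArg
      apply List.map_congr_left
      intro dg _
      rw [sub_right_comm]

lemma solution_alt_eq_cntF (k : Int) :
    solution_alt k = cntF 0 k + cntF 1 k + cntF 2 k + cntF 3 k + cntF 4 k + cntF 5 k := by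
  have hr : PySem.List.pyRange 0 5 = [0, 1, 2, 3, 4] := by decide
  have e : ∀ n, (pvConv^[n] pvInit).getD k 0 = cntF n k := fun n => getD_iter n k
  have e0 : pvInit.getD k 0 = cntF 0 k := by simpa using e 0
  have e1 : (pvConv pvInit).getD k 0 = cntF 1 k := by
    simpa [Function.iterate_succ_apply', Function.iterate_zero_apply] using e 1
  have e2 : (pvConv (pvConv pvInit)).getD k 0 = cntF 2 k := by
    simpa [Function.iterate_succ_apply, Function.iterate_zero_apply] using e 2
  have e3 : (pvConv (pvConv (pvConv pvInit))).getD k 0 = cntF 3 k := by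
    simpa [Function.iterate_succ_apply, Function.iterate_zero_apply] using e 3
  have e4 : (pvConv (pvConv (pvConv (pvConv pvInit)))).getD k 0 = cntF 4 k := by
    simpa [Function.iterate_succ_apply, Function.iterate_zero_apply] using e 4
  have e5 : (pvConv (pvConv (pvConv (pvConv (pvConv pvInit))))).getD k 0 = cntF 5 k := by
    simpa [Function.iterate_succ_apply, Function.iterate_zero_apply] using e 5
  unfold solution_alt
  rw [hr]
  simp only [List.foldl_cons, List.foldl_nil]
  rw [e0, e1, e2, e3, e4, e5]

-- ===== VERDICT (by name: the statement is the Claim_ definition above) =====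
theorem solution_spec : Claim_equal_solution := by
  intro k _
  unfold Spec_solution
  rw [solution_eq_cntF, solution_alt_eq_cntF]
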